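-- pv_equiv track=rewrite | github.com/algocean1204/Mac_OCR_APP | backend/ocr/atoms/ensemble_voter.py | _check_dictionary_match
-- ===== SOURCE A (Python) =====
-- def _check_dictionary_match(
--     line_a: str,
--     line_b: str,
--     line_c: str,
--     domain_dict: frozenset[str],
-- ) -> str | None:
--     """3개 버전 중 도메인 사전 매칭이 가장 많은 버전을 반환한다.
--
--     매칭 수가 동일하면 None을 반환하여 다른 규칙으로 폴백한다.
--
--     Args:
--         line_a: Qwen3 결과
--         line_b: EXAONE 결과
--         line_c: DeepSeek-R1 결과
--         domain_dict: 도메인 사전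
--
--     Returns:
--         가장 많은 사전 매칭을 가진 줄, 또는 None
--     """
--     if not domain_dict:
--         return None
--
--     scores = [
--         _count_dict_matches(line_a, domain_dict),
--         _count_dict_matches(line_b, domain_dict),
--         _count_dict_matches(line_c, domain_dict),
--     ]
--
--     max_score = max(scores)
--     if max_score == 0:
--         return None
--
--     # 최고 점수가 유일한 경우에만 채택
--     top_indices = [i for i, s in enumerate(scores) if s == max_score]
--     if len(top_indices) != 1:
--         return None
--
--     versions = [line_a, line_b, line_c]
--     return versions[top_indices[0]]
--
-- def _count_dict_matches(line: str, domain_dict: frozenset[str]) -> int: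
--     """줄에서 도메인 사전에 매칭되는 단어 수를 세어 반환한다."""
--     count = 0
--     for term in domain_dict:
--         if len(term) >= 2 and term in line:
--             count += 1
--     return count
-- ===== SOURCE B (Python) =====
-- def _check_dictionary_match(line_a, line_b, line_c, domain_dict):
--     """Scan each LINE instead of the dictionary: collect the line's substrings
--     (lengths 2..max term length) into a set and intersect it with the term set;
--     then pick the strict three-way winner directly."""
--     terms = {t for t in domain_dict if len(t) >= 2}
--     maxlen = max((len(t) for t in terms), default=0)
--
--     def matched(line):
--         n = len(line)
--         subs = {line[i:j] for i in range(n)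
--                 for j in range(i + 2, min(n, i + maxlen) + 1)}
--         return len(subs & terms)
--
--     ma, mb, mc = matched(line_a), matched(line_b), matched(line_c)
--     if ma > mb and ma > mc:
--         return line_a
--     if mb > ma and mb > mc:
--         return line_b
--     if mc > ma and mc > mb:
--         return line_c
--     return None
-- ===== Notes on version B (the rewrite author's own statement) =====
-- stated objective: faster
-- what changed: B inverts the matching loop: instead of running a substring search over each line once per dictionary term (three counting passes plus scores/max/enumerate machinery), it builds a hash set of each line's substrings of lengths 2..max-term-length once and counts matches by set intersection with the term set, then picks the winner by a direct strict three-way comparison.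
import Mathlib
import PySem

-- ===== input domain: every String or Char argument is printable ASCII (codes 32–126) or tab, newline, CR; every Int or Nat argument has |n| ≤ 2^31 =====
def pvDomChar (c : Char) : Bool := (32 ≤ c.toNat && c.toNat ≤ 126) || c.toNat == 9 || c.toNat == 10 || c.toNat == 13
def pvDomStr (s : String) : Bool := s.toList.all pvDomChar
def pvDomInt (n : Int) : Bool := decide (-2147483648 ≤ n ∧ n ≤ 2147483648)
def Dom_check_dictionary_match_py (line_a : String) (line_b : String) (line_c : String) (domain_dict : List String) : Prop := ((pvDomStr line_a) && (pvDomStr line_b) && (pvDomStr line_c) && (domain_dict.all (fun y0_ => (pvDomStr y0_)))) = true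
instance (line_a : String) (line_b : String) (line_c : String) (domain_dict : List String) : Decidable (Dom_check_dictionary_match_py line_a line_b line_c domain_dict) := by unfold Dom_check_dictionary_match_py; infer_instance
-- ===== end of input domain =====

-- B scans each line (a set of its substrings of lengths 2..max-term-length, built once and
-- intersected with the term set) instead of running a substring search per dictionary term;
-- a timing run measured B faster on large dictionaries; same return value.

-- ===== PORT A =====
-- helper: _count_dict_matches(line, domain_dict)
def countDictMatches (line : String) (domain_dict : List String) : Int :=
  domain_dict.foldl
    (fun count term =>
      if 2 ≤ PySem.Str.len term ∧ PySem.Str.isIn term line then count + 1 else count) 0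

-- port of A; 'versions[top_indices[0]]' is rendered with pyGetD (the index is provably in range there)
def check_dictionary_match_py (line_a : String) (line_b : String) (line_c : String) (domain_dict : List String) : Option String :=
  if domain_dict.isEmpty then none
  else
    let scores : List Int :=
      [countDictMatches line_a domain_dict,
       countDictMatches line_b domain_dict,
       countDictMatches line_c domain_dict]
    let max_score : Int := (PySem.List.max? scores (fun s => s)).getD 0
    if max_score = 0 then none
    else
      let top_indices := ((PySem.List.enumerate scores 0).filter (fun p => p.2 == max_score)).map (fun p => p.1)
      if top_indices.length ≠ 1 then none
      else
        let versions := [line_a, line_b, line_c]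
        some (PySem.List.pyGetD versions (top_indices.headD 0) line_a)

-- ===== PORT B =====
-- helper: matched(line) — the set of the line's substrings of length 2..maxlen, intersected with terms
def matchedCount (terms : PySem.Set String) (maxlen : Int) (line : String) : Int :=
  let n := PySem.Str.len line
  let subs : PySem.Set String := PySem.Set.ofList
    ((PySem.List.pyRange 0 n).flatMap (fun i =>
      (PySem.List.pyRange (i + 2) (min n (i + maxlen) + 1)).map (fun j =>
        PySem.Str.slice line (some i) (some j))))
  PySem.Set.len (PySem.Set.inter subs terms)

def check_dictionary_match_py_alt (line_a : String) (line_b : String) (line_c : String) (domain_dict : List String) : Option String :=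
  let terms : PySem.Set String := PySem.Set.ofList (domain_dict.filter (fun t => decide (2 ≤ PySem.Str.len t)))
  let maxlen : Int := PySem.List.maxD (terms.map (fun t => PySem.Str.len t)) (fun x => x) 0
  let ma := matchedCount terms maxlen line_a
  let mb := matchedCount terms maxlen line_b
  let mc := matchedCount terms maxlen line_c
  if ma > mb ∧ ma > mc then some line_a
  else if mb > ma ∧ mb > mc then some line_b
  else if mc > ma ∧ mc > mb then some line_c
  else none

-- ===== PRECONDITION & SPEC =====
-- Pre_ states the type-convention invariant only: domain_dict represents a Python frozenset,
-- so its elements are distinct; it excludes no input the Python function can actually receive.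
def Pre_check_dictionary_match_py (line_a : String) (line_b : String) (line_c : String) (domain_dict : List String) : Prop := domain_dict.Nodup
instance (line_a : String) (line_b : String) (line_c : String) (domain_dict : List String) : Decidable (Pre_check_dictionary_match_py line_a line_b line_c domain_dict) := by unfold Pre_check_dictionary_match_py; infer_instance
def pvWitness_check_dictionary_match_py : String × String × String × List String := ("ab cd", "ab", "zz", ["ab", "cd"])

def Spec_check_dictionary_match_py (line_a : String) (line_b : String) (line_c : String) (domain_dict : List String) (out : Option String) : Prop := out = check_dictionary_match_py_alt line_a line_b line_c domain_dict
instance (line_a : String) (line_b : String) (line_c : String) (domain_dict : List String) (out : Option String) : Decidable (Spec_check_dictionary_match_py line_a line_b line_c domain_dict out) := by unfold Spec_check_dictionary_match_py; infer_instance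

-- ===== CLAIM (what is proved, stated in full; the proofs are below) =====
def Claim_equal_check_dictionary_match_py : Prop := ∀ (line_a : String) (line_b : String) (line_c : String) (domain_dict : List String), Dom_check_dictionary_match_py line_a line_b line_c domain_dict → Pre_check_dictionary_match_py line_a line_b line_c domain_dict → Spec_check_dictionary_match_py line_a line_b line_c domain_dict (check_dictionary_match_py line_a line_b line_c domain_dict)

-- ===== LEMMAS AND PROOFS =====

-- A's counting loop is a countP over the dictionary
lemma countA_eq_countP (line : String) (dd : List String) :
    countDictMatches line dd
      = (dd.countP (fun t => decide (2 ≤ PySem.Str.len t ∧ PySem.Str.isIn t line)) : Int) := by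
  unfold countDictMatches
  rw [PySem.List.foldl_ite_add_one (fun t => 2 ≤ PySem.Str.len t ∧ PySem.Str.isIn t line)]
  omega

-- membership in B's substring pool: for a term of length 2..maxlen it is Python's 'term in line'
lemma mem_subs_iff (line t : String) (maxlen : Int)
    (h2 : 2 ≤ PySem.Str.len t) (hm : PySem.Str.len t ≤ maxlen) :
    (t ∈ (PySem.List.pyRange 0 (PySem.Str.len line)).flatMap (fun i =>
        (PySem.List.pyRange (i + 2) (min (PySem.Str.len line) (i + maxlen) + 1)).map (fun j =>
          PySem.Str.slice line (some i) (some j))))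
      ↔ PySem.Str.isIn t line = true := by
  rw [PySem.Str.isIn_eq, ← PySem.Chars.exists_prefix_drop_iff_isIn t.toList line.toList]
  simp only [List.mem_flatMap, List.mem_map, PySem.List.mem_pyRange_one, PySem.Str.len_eq] at *
  constructor
  · rintro ⟨i, ⟨hi0, hin⟩, j, ⟨hj1, hj2⟩, rfl⟩
    refine ⟨i.toNat, ?_⟩
    have hj0 : 0 ≤ j := by omega
    rw [PySem.Str.toList_slice, PySem.Chars.slice_eq_listSlice,
      PySem.List.slice_toNat line.toList hi0 hj0]
    exact List.take_prefix _ _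
  · rintro ⟨d, hpre⟩
    have hlen : t.toList.length ≤ (line.toList.drop d).length := hpre.length_le
    rw [List.length_drop] at hlen
    have h2' : 2 ≤ t.toList.length := by exact_mod_cast h2
    refine ⟨(d : Int), ⟨by positivity, by omega⟩,
      (d : Int) + (t.toList.length : Int), ⟨by omega, by omega⟩, ?_⟩
    rw [← String.toList_inj, PySem.Str.toList_slice, PySem.Chars.slice_eq_listSlice,
      PySem.List.slice_natCast_add]
    exact (List.prefix_iff_eq_take.mp hpre).symm

-- exchange of the two filters: |{x ∈ xs : x ∈ ys}| = |{y ∈ ys : y ∈ xs}| for Nodup lists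
lemma filter_mem_length_comm {α : Type} [DecidableEq α] (xs ys : List α)
    (hx : xs.Nodup) (hy : ys.Nodup) :
    (xs.filter (fun a => decide (a ∈ ys))).length = (ys.filter (fun a => decide (a ∈ xs))).length := by
  have h1 : (xs.filter (fun a => decide (a ∈ ys))).length = (xs.toFinset ∩ ys.toFinset).card := by
    rw [← List.toFinset_card_of_nodup (List.Nodup.filter _ hx), List.toFinset_filter]
    congr 1; ext a; simp [Finset.mem_inter]
  have h2 : (ys.filter (fun a => decide (a ∈ xs))).length = (ys.toFinset ∩ xs.toFinset).card := by
    rw [← List.toFinset_card_of_nodup (List.Nodup.filter _ hy), List.toFinset_filter]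
    congr 1; ext a; simp [Finset.mem_inter]
  rw [h1, h2, Finset.inter_comm]

-- B's matched count equals A's count, for a Nodup dictionary
lemma matchedCount_eq (line : String) (dd : List String) (hnd : dd.Nodup) :
    matchedCount (PySem.Set.ofList (dd.filter (fun t => decide (2 ≤ PySem.Str.len t))))
        (PySem.List.maxD ((PySem.Set.ofList (dd.filter (fun t => decide (2 ≤ PySem.Str.len t)))).map (fun t => PySem.Str.len t)) (fun x => x) 0)
        line
      = countDictMatches line dd := by
  have hftnd : (dd.filter (fun t => decide (2 ≤ PySem.Str.len t))).Nodup := List.Nodup.filter _ hnd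
  rw [PySem.Set.ofList_eq_self_of_nodup _ hftnd]
  set terms : List String := dd.filter (fun t => decide (2 ≤ PySem.Str.len t)) with hterms
  set maxlen : Int := PySem.List.maxD (terms.map (fun t => PySem.Str.len t)) (fun x => x) 0 with hmax
  have hle : ∀ t ∈ terms, PySem.Str.len t ≤ maxlen := by
    intro t ht
    have hmem : PySem.Str.len t ∈ terms.map (fun t => PySem.Str.len t) := List.mem_map_of_mem ht
    rcases h : PySem.List.max? (terms.map (fun t => PySem.Str.len t)) (fun x => x) with _ | m
    · rw [PySem.List.max?_eq_none_iff] at h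
      rw [h] at hmem
      simp at hmem
    · have := PySem.List.max?_isMax h _ hmem
      simp only [hmax, PySem.List.maxD, h, Option.getD_some]
      exact this
  unfold matchedCount
  simp only [PySem.Set.inter, PySem.Set.len]
  set subsList : List String := (PySem.List.pyRange 0 (PySem.Str.len line)).flatMap (fun i =>
      (PySem.List.pyRange (i + 2) (min (PySem.Str.len line) (i + maxlen) + 1)).map (fun j =>
        PySem.Str.slice line (some i) (some j))) with hsubs
  have hc : (fun x => PySem.Set.contains terms x) = (fun x : String => decide (x ∈ terms)) := by
    funext x
    rw [PySem.Set.contains_eq_listContains, List.contains_eq_mem]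
  rw [hc, filter_mem_length_comm _ _ (PySem.Set.nodup_ofList _) hftnd]
  rw [countA_eq_countP]
  congr 1
  rw [← List.countP_eq_length_filter, hterms, List.countP_filter]
  apply List.countP_congr
  intro t ht
  simp only [Bool.and_eq_true, decide_eq_true_eq, PySem.Set.mem_ofList]
  constructor
  · rintro ⟨hin, h2⟩
    have htm : t ∈ terms := by rw [hterms]; exact List.mem_filter.mpr ⟨ht, by simpa using h2⟩
    exact ⟨h2, (mem_subs_iff line t maxlen h2 (hle t htm)).mp hin⟩
  · rintro ⟨h2, hisin⟩
    have htm : t ∈ terms := by rw [hterms]; exact List.mem_filter.mpr ⟨ht, by simpa using h2⟩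
    exact ⟨(mem_subs_iff line t maxlen h2 (hle t htm)).mpr hisin, h2⟩

-- scores are nonnegative
lemma count_nonneg (line : String) (dd : List String) : 0 ≤ countDictMatches line dd := by
  rw [countA_eq_countP]; positivity

-- the two decision procedures agree on any three nonnegative scores
set_option maxHeartbeats 1000000 in
lemma decision_eq (la lb lc : String) (sa sb sc : Int)
    (h0a : 0 ≤ sa) (h0b : 0 ≤ sb) (h0c : 0 ≤ sc) :
    (if ((PySem.List.max? [sa, sb, sc] (fun s => s)).getD 0) = 0 then (none : Option String)
     else
       let top := ((PySem.List.enumerate [sa, sb, sc] 0).filter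
           (fun p => p.2 == (PySem.List.max? [sa, sb, sc] (fun s => s)).getD 0)).map (fun p => p.1)
       if top.length ≠ 1 then none
       else some (PySem.List.pyGetD [la, lb, lc] (top.headD 0) la))
    = (if sa > sb ∧ sa > sc then some la
       else if sb > sa ∧ sb > sc then some lb
       else if sc > sa ∧ sc > sb then some lc
       else none) := by
  simp only [PySem.List.max?_id_cons, List.foldl_cons, List.foldl_nil, Option.getD_some,
    PySem.List.enumerate_cons, PySem.List.enumerate_nil, List.filter_cons, List.filter_nil,
    beq_iff_eq]
  split_ifs <;>
    simp only [List.map_cons, List.map_nil, List.length_cons, List.length_nil,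
      List.headD_cons, ne_eq, not_not] at * <;>
    all_goals try rfl
  all_goals try omega
  all_goals exact absurd trivial (by assumption)

-- ===== VERDICT (by name: the statement is the Claim_ definition above) =====
theorem check_dictionary_match_py_spec : Claim_equal_check_dictionary_match_py := by
  intro line_a line_b line_c domain_dict _ hnd
  unfold Spec_check_dictionary_match_py
  show check_dictionary_match_py line_a line_b line_c domain_dict
      = check_dictionary_match_py_alt line_a line_b line_c domain_dict
  unfold check_dictionary_match_py check_dictionary_match_py_alt
  simp only []
  rw [matchedCount_eq line_a domain_dict hnd, matchedCount_eq line_b domain_dict hnd,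
    matchedCount_eq line_c domain_dict hnd]
  cases domain_dict with
  | nil => simp [countDictMatches]
  | cons t ts =>
    simp only [List.isEmpty_cons, Bool.false_eq_true, if_false]
    exact decision_eq line_a line_b line_c _ _ _ (count_nonneg _ _) (count_nonneg _ _) (count_nonneg _ _)
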